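-- pv_equiv track=rewrite | github.com/future-mind/DynamicCompactDetect | scripts/inference_simple.py | colors
-- ===== SOURCE A (Python) =====
-- def colors(i, bgr=False):
--     """Generate colors for drawing bounding boxes."""
--     hex = ('FF3838', 'FF9D97', 'FF701F', 'FFB21D', 'CFD231', '48F90A', '92CC17', '3DDB86', '1A9334', '00D4BB',
--            '2C99A8', '00C2FF', '344593', '6473FF', '0018EC', '8438FF', '520085', 'CB38FF', 'FF95C8', 'FF37C7')
--     palette = []
--     for j in range(len(hex)):
--         h = '#' + hex[j]
--         rgb = tuple(int(h[1 + i:1 + i + 2], 16) for i in (0, 2, 4))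
--         palette.append(rgb)
--
--     num = len(palette)
--     color = palette[int(i) % num]
--
--     return (color[2], color[1], color[0]) if bgr else color  # BGR if bgr else RGB
-- ===== SOURCE B (Python) =====
-- def colors(i, bgr=False):
--     """Generate colors for drawing bounding boxes."""
--     hex = ('FF3838', 'FF9D97', 'FF701F', 'FFB21D', 'CFD231', '48F90A', '92CC17', '3DDB86', '1A9334', '00D4BB',
--            '2C99A8', '00C2FF', '344593', '6473FF', '0018EC', '8438FF', '520085', 'CB38FF', 'FF95C8', 'FF37C7')
--     idx = int(i) % 20
--     r, g, b = bytes.fromhex(hex[idx])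
--     return (b, g, r) if bgr else (r, g, b)
-- ===== Notes on version B (the rewrite author's own statement) =====
-- stated objective: simpler
-- what changed: B drops A's build-the-whole-palette loop: it computes idx = int(i) % 20 once and parses only the selected hex string (bytes.fromhex) into the RGB triple.
import Mathlib
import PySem

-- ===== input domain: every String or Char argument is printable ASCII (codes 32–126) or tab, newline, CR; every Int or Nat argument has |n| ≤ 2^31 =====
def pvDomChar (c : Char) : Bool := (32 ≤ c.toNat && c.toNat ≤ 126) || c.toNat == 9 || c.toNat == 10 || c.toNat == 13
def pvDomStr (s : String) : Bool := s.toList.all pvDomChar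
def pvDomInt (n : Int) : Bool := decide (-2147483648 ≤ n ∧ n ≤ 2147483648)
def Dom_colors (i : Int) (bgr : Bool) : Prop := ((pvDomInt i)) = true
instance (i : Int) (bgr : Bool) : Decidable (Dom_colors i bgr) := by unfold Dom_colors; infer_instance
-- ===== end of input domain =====

-- B drops A's build-the-whole-palette loop and parses only the selected hex entry; objective: simpler.

-- ===== PORT A =====
-- the tuple of hex strings A binds to `hex`
def pvHexA : List String :=
  ["FF3838", "FF9D97", "FF701F", "FFB21D", "CFD231", "48F90A", "92CC17", "3DDB86", "1A9334", "00D4BB",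
   "2C99A8", "00C2FF", "344593", "6473FF", "0018EC", "8438FF", "520085", "CB38FF", "FF95C8", "FF37C7"]

-- A's palette-building loop: for j in range(len(hex)): h = '#'+hex[j]; rgb = tuple(int(h[1+i:1+i+2],16) for i in (0,2,4))
-- (int(...) never raises on these literal digits, so the ValueError branch .getD 0 is unreachable)
def pvPaletteA : List (Int × Int × Int) :=
  (PySem.List.pyRange 0 (pvHexA.length : Int) 1).foldl
    (fun palette j =>
      let h : String := "#" ++ (PySem.List.pyGet? pvHexA j).getD ""
      let comp : Int → Int := fun i =>
        (PySem.Int.ofStrBase? (PySem.Str.slice h (some (1 + i)) (some (1 + i + 2))) 16).getD 0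
      palette ++ [(comp 0, comp 2, comp 4)])
    []

def colors (i : Int) (bgr : Bool) : Int × Int × Int :=
  let num : Int := (pvPaletteA.length : Int)
  let color := (PySem.List.pyGet? pvPaletteA (PySem.Int.mod i num)).getD (0, 0, 0)
  if bgr then (color.2.2, color.2.1, color.1) else color

-- ===== PORT B =====
def pvHexB : List String :=
  ["FF3838", "FF9D97", "FF701F", "FFB21D", "CFD231", "48F90A", "92CC17", "3DDB86", "1A9334", "00D4BB",
   "2C99A8", "00C2FF", "344593", "6473FF", "0018EC", "8438FF", "520085", "CB38FF", "FF95C8", "FF37C7"]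

-- hand port of bytes.fromhex for one hex digit (exact on the 0-9/A-F digits appearing in pvHexB)
def pvHexDigit (c : Char) : Int :=
  if '0' ≤ c ∧ c ≤ '9' then (c.toNat : Int) - ('0'.toNat : Int)
  else if 'a' ≤ c ∧ c ≤ 'f' then (c.toNat : Int) - ('a'.toNat : Int) + 10
  else if 'A' ≤ c ∧ c ≤ 'F' then (c.toNat : Int) - ('A'.toNat : Int) + 10
  else 0

def colors_alt (i : Int) (bgr : Bool) : Int × Int × Int :=
  let idx := PySem.Int.mod i 20
  -- r, g, b = bytes.fromhex(hex[idx])  (every entry has exactly 6 hex digits)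
  match ((PySem.List.pyGet? pvHexB idx).getD "").toList with
  | [r1, r2, g1, g2, b1, b2] =>
      let r := 16 * pvHexDigit r1 + pvHexDigit r2
      let g := 16 * pvHexDigit g1 + pvHexDigit g2
      let b := 16 * pvHexDigit b1 + pvHexDigit b2
      if bgr then (b, g, r) else (r, g, b)
  | _ => (0, 0, 0)   -- unreachable: all 20 entries have length 6

-- ===== PRECONDITION & SPEC =====
def Spec_colors (i : Int) (bgr : Bool) (out : Int × Int × Int) : Prop := out = colors_alt i bgr
instance (i : Int) (bgr : Bool) (out : Int × Int × Int) : Decidable (Spec_colors i bgr out) := by unfold Spec_colors; infer_instance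

-- ===== CLAIM (what is proved, stated in full; the proofs are below) =====
def Claim_equal_colors : Prop := ∀ (i : Int) (bgr : Bool), Dom_colors i bgr → Spec_colors i bgr (colors i bgr)

-- ===== LEMMAS AND PROOFS =====
theorem pv_mod_self (i : Int) :
    PySem.Int.mod (PySem.Int.mod i 20) 20 = PySem.Int.mod i 20 := by
  have h0 := PySem.Int.mod_nonneg (a := i) (b := 20) (by norm_num)
  have h1 := PySem.Int.mod_lt (a := i) (b := 20) (by norm_num)
  rw [PySem.Int.mod_eq_emod_of_pos (by norm_num : (0:Int) < 20)]
  exact Int.emod_eq_of_lt h0 h1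

theorem colors_mod (i : Int) (bgr : Bool) :
    colors i bgr = colors (PySem.Int.mod i 20) bgr := by
  have hlen : (pvPaletteA.length : Int) = 20 := by decide
  simp only [colors, hlen, pv_mod_self]

theorem colors_alt_mod (i : Int) (bgr : Bool) :
    colors_alt i bgr = colors_alt (PySem.Int.mod i 20) bgr := by
  simp only [colors_alt, pv_mod_self]

theorem pv_key : ∀ m : Int, 0 ≤ m → m < 20 → ∀ b : Bool, colors m b = colors_alt m b := by
  intro m h0 h1 b
  interval_cases m <;> cases b <;> decide

-- ===== VERDICT (by name: the statement is the Claim_ definition above) =====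
theorem colors_spec : Claim_equal_colors := by
  intro i bgr _
  unfold Spec_colors
  rw [colors_mod, colors_alt_mod]
  exact pv_key _ (PySem.Int.mod_nonneg (a := i) (b := 20) (by norm_num)) (PySem.Int.mod_lt (a := i) (b := 20) (by norm_num)) bgr
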